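-- pv_equiv track=rewrite | github.com/PedroCarvalho03/Trabalhos-de-Comp1---Python | Lista4/lista4pedrorocha.py | questao4
-- ===== SOURCE A (Python) =====
-- def questao4(lista):
--     '''Entrada = list
--        Saida = int
--        Calcula a soma das multiplicacoes entre os valores da lista'''
--     soma = 0
--     pos = 0
--     quant = len(lista)
--     while pos<len(lista):
--         if pos == 0 :
--             while quant>0:
--                 soma = soma + lista[pos]*lista[quant-1]
--                 quant = quant - 1
--         elif lista[pos-1]<lista[pos] and pos != 0:
--             quant = len(lista)
--             while quant>pos:
--                 soma = soma + lista[pos]*lista[quant-1]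
--                 quant = quant - 1
--
--         pos = pos + 1
--
--
--     return soma
-- ===== SOURCE B (Python) =====
-- def questao4(lista):
--     '''Entrada = list
--        Saida = int
--        Calcula a soma das multiplicacoes entre os valores da lista'''
--     soma = 0
--     suf = sum(lista)
--     for pos, x in enumerate(lista):
--         if pos == 0 or lista[pos - 1] < x:
--             soma += x * suf
--         suf -= x
--     return soma
-- ===== Notes on version B (the rewrite author's own statement) =====
-- stated objective: faster
-- what changed: Replaced the quadratic nested while-loops (re-summing the suffix element by element for each qualifying position) by a single pass that maintains a running suffix sum and multiplies each qualifying element by it.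
import Mathlib
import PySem

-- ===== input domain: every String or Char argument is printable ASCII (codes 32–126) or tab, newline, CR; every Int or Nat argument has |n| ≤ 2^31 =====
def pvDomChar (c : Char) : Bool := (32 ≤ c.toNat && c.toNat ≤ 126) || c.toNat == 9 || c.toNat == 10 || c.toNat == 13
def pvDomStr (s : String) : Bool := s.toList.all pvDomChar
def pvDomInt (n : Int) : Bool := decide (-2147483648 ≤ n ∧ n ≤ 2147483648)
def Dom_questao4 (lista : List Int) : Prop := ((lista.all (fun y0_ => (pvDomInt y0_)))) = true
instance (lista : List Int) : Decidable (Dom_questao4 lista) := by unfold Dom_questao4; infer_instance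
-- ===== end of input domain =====

-- B replaces A's quadratic nested re-summing of suffixes by one pass with a running suffix sum (faster).

-- ===== PORT A =====
-- every index A uses is provably in range (0 ≤ i < len), so getD is exact there
def pvIdx (l : List Int) (i : Nat) : Int := l.getD i 0

-- `while quant>0: soma = soma + lista[pos]*lista[quant-1]; quant = quant - 1`
def pvInner0 (l : List Int) (pos : Nat) (quant : Nat) (soma : Int) : Int :=
  match quant with
  | 0 => soma
  | q + 1 => pvInner0 l pos q (soma + pvIdx l pos * pvIdx l q)

-- `quant = len(lista); while quant>pos: soma = soma + lista[pos]*lista[quant-1]; quant = quant - 1`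
def pvInner1 (l : List Int) (pos : Nat) (quant : Nat) (soma : Int) : Int :=
  if quant > pos then pvInner1 l pos (quant - 1) (soma + pvIdx l pos * pvIdx l (quant - 1)) else soma

-- the outer `while pos<len(lista)` loop, state (pos, quant, soma); after an inner loop quant
-- holds its final value (0 resp. pos)
def pvOuter (l : List Int) (pos : Nat) (quant : Nat) (soma : Int) : Int :=
  if pos < l.length then
    if pos = 0 then
      pvOuter l (pos + 1) 0 (pvInner0 l pos quant soma)
    else if pvIdx l (pos - 1) < pvIdx l pos ∧ pos ≠ 0 then
      pvOuter l (pos + 1) pos (pvInner1 l pos l.length soma)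
    else
      pvOuter l (pos + 1) quant soma
  else soma
termination_by l.length - pos

def questao4 (lista : List Int) : Int := pvOuter lista 0 lista.length 0

-- ===== PORT B =====
-- `for pos, x in enumerate(lista): …`, state (pos, soma, suf), rest = the part not yet visited
def pvBLoop (lista : List Int) (rest : List Int) (pos : Nat) (soma suf : Int) : Int :=
  match rest with
  | [] => soma
  | x :: xs =>
    pvBLoop lista xs (pos + 1)
      (if pos = 0 ∨ pvIdx lista (pos - 1) < x then soma + x * suf else soma) (suf - x)

def questao4_alt (lista : List Int) : Int := pvBLoop lista lista 0 0 lista.sum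

-- ===== PRECONDITION & SPEC =====
def Spec_questao4 (lista : List Int) (out : Int) : Prop := out = questao4_alt lista
instance (lista : List Int) (out : Int) : Decidable (Spec_questao4 lista out) := by unfold Spec_questao4; infer_instance

-- ===== CLAIM (what is proved, stated in full; the proofs are below) =====
def Claim_equal_questao4 : Prop := ∀ (lista : List Int), Dom_questao4 lista → Spec_questao4 lista (questao4 lista)

-- ===== LEMMAS AND PROOFS =====

-- reference value: Σ over positions pos with (pos = 0 ∨ l[pos-1] < l[pos]) of l[pos] * sum(l[pos:])
def pvRef (l : List Int) (pos : Nat) : Int :=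
  if pos < l.length then
    (if pos = 0 ∨ pvIdx l (pos - 1) < pvIdx l pos then pvIdx l pos * (l.drop pos).sum else 0)
      + pvRef l (pos + 1)
  else 0
termination_by l.length - pos

-- partial index sum Σ_{j<q} l[j]
def pvPSum (l : List Int) (q : Nat) : Int :=
  match q with
  | 0 => 0
  | q + 1 => pvPSum l q + pvIdx l q

lemma pvPSum_drop (l : List Int) :
    ∀ (pos : Nat), pos ≤ l.length → pvPSum l l.length - pvPSum l pos = (l.drop pos).sum := by
  intro pos
  induction hn : l.length - pos using Nat.strong_induction_on generalizing pos with
  | _ n ih =>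
    intro h
    rcases Nat.lt_or_ge pos l.length with hlt | hge
    · have hdrop : l.drop pos = l[pos] :: l.drop (pos + 1) :=
        List.drop_eq_getElem_cons hlt
      have h1 := ih (l.length - (pos + 1)) (by omega) (pos + 1) rfl (by omega)
      rw [hdrop]
      simp only [List.sum_cons, ← h1, pvPSum, pvIdx]
      have : l.getD pos 0 = l[pos] := List.getD_eq_getElem l 0 hlt
      rw [this]; ring
    · have : pos = l.length := le_antisymm h hge
      subst this
      simp [List.drop_length]

lemma pvInner0_eq (l : List Int) (pos : Nat) :
    ∀ (q : Nat) (soma : Int), pvInner0 l pos q soma = soma + pvIdx l pos * pvPSum l q := by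
  intro q
  induction q with
  | zero => intro soma; simp [pvInner0, pvPSum]
  | succ q ih => intro soma; simp only [pvInner0, pvPSum, ih]; ring

lemma pvInner1_eq (l : List Int) (pos : Nat) :
    ∀ (q : Nat) (soma : Int), pos ≤ q →
      pvInner1 l pos q soma = soma + pvIdx l pos * (pvPSum l q - pvPSum l pos) := by
  intro q
  induction q with
  | zero =>
    intro soma h
    have : pos = 0 := Nat.le_zero.mp h
    subst this
    rw [pvInner1]; simp [pvPSum]
  | succ q ih =>
    intro soma h
    rw [pvInner1]
    rcases Nat.lt_or_ge pos (q + 1) with hlt | hge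
    · simp only [if_pos hlt, Nat.add_sub_cancel]
      have hle : pos ≤ q := by omega
      rw [ih _ hle]
      simp only [pvPSum]; ring
    · have : ¬ (q + 1 > pos) := by omega
      simp only [if_neg this]
      have : pos = q + 1 := by omega
      subst this
      simp

lemma pvOuter_eq (l : List Int) :
    ∀ (pos : Nat) (q : Nat) (soma : Int), 1 ≤ pos →
      pvOuter l pos q soma = soma + pvRef l pos := by
  intro pos
  induction hn : l.length - pos using Nat.strong_induction_on generalizing pos with
  | _ n ih =>
    intro q soma hpos
    rw [pvOuter, pvRef]
    rcases Nat.lt_or_ge pos l.length with hlt | hge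
    · have hne : pos ≠ 0 := by omega
      simp only [if_pos hlt, if_neg hne]
      have hih := ih (l.length - (pos + 1)) (by omega) (pos + 1) rfl
      by_cases hc : pvIdx l (pos - 1) < pvIdx l pos
      · simp only [if_pos (And.intro hc hne), if_pos (Or.inr hc)]
        rw [hih _ _ (by omega), pvInner1_eq l pos l.length soma (le_of_lt hlt),
            pvPSum_drop l pos (le_of_lt hlt)]
        ring
      · have : ¬ (pvIdx l (pos - 1) < pvIdx l pos ∧ pos ≠ 0) := fun ⟨a, _⟩ => hc a
        simp only [if_neg this]
        have : ¬ (pos = 0 ∨ pvIdx l (pos - 1) < pvIdx l pos) := by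
          rintro (h0 | h1); exact hne h0; exact hc h1
        simp only [if_neg this]
        rw [hih _ _ (by omega)]
        ring
    · have : ¬ pos < l.length := by omega
      simp [this]

lemma pvBLoop_eq (l : List Int) :
    ∀ (rest : List Int) (pos : Nat) (soma : Int), rest = l.drop pos →
      pvBLoop l rest pos soma rest.sum = soma + pvRef l pos := by
  intro rest
  induction rest with
  | nil =>
    intro pos soma hdrop
    have hge : l.length ≤ pos := by
      by_contra hlt
      push Not at hlt
      have hc := List.drop_eq_getElem_cons hlt
      rw [← hdrop] at hc
      simp at hc
      omega
    rw [pvRef]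
    simp [pvBLoop, Nat.not_lt.mpr hge]
  | cons x xs ih =>
    intro pos soma hdrop
    have hlt : pos < l.length := by
      by_contra hge
      push Not at hge
      rw [List.drop_eq_nil_of_le hge] at hdrop
      simp at hdrop
    have hcons : l.drop pos = l[pos] :: l.drop (pos + 1) := List.drop_eq_getElem_cons hlt
    rw [← hdrop] at hcons
    have hx : x = l[pos] := by injection hcons
    have hxs : xs = l.drop (pos + 1) := by injection hcons
    have hxidx : pvIdx l pos = x := by
      rw [pvIdx, List.getD_eq_getElem l 0 hlt, ← hx]
    have hs : (x :: xs).sum - x = xs.sum := by simp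
    rw [pvBLoop, pvRef, hs, ih (pos + 1) _ hxs]
    simp only [if_pos hlt, hxidx, ← hdrop]
    split_ifs <;> ring

lemma questao4_eq_ref (l : List Int) : questao4 l = pvRef l 0 := by
  rw [questao4, pvOuter, pvRef]
  rcases Nat.lt_or_ge 0 l.length with hlt | hge
  · rw [if_pos hlt, if_pos hlt, if_pos rfl, if_pos (Or.inl rfl)]
    rw [pvOuter_eq l 1 0 _ le_rfl, pvInner0_eq]
    have h0 : pvPSum l l.length = (l.drop 0).sum := by
      have := pvPSum_drop l 0 (Nat.zero_le _)
      simpa [pvPSum] using this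
    rw [h0]
    ring
  · have : ¬ (0 < l.length) := by omega
    simp [this]

lemma questao4_alt_eq_ref (l : List Int) : questao4_alt l = pvRef l 0 := by
  rw [questao4_alt]
  have h := pvBLoop_eq l l 0 0 (by simp)
  simpa using h

-- ===== VERDICT (by name: the statement is the Claim_ definition above) =====
theorem questao4_spec : Claim_equal_questao4 := by
  intro lista _
  unfold Spec_questao4
  rw [questao4_eq_ref, questao4_alt_eq_ref]
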